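-- pv_equiv track=rewrite | github.com/cryptopoly/ChaosEngineAI | backend_service/helpers/images.py | _image_discover_style_tags
-- ===== SOURCE A (Python) =====
-- def _image_discover_style_tags(tags: list[str]) -> list[str]:
--     preferred = {
--         "photoreal",
--         "illustration",
--         "anime",
--         "general",
--         "fast",
--         "detailed",
--         "turbo",
--         "distilled",
--         "edit",
--         "inpaint",
--         "flux",
--         "sana",
--         "qwenimage",
--         "hidream",
--     }
--     seen: list[str] = []
--     for tag in tags:
--         lowered = str(tag).lower()
--         if lowered in preferred and lowered not in seen:
--             seen.append(lowered)
--     return seen[:4]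
-- ===== SOURCE B (Python) =====
-- def _image_discover_style_tags(tags: list[str]) -> list[str]:
--     preferred = [
--         "photoreal",
--         "illustration",
--         "anime",
--         "general",
--         "fast",
--         "detailed",
--         "turbo",
--         "distilled",
--         "edit",
--         "inpaint",
--         "flux",
--         "sana",
--         "qwenimage",
--         "hidream",
--     ]
--     lowered = [str(tag).lower() for tag in tags]
--     found = [(lowered.index(p), p) for p in preferred if p in lowered]
--     found.sort(key=lambda pair: pair[0])
--     return [p for _, p in found[:4]]
-- ===== Notes on version B (the rewrite author's own statement) =====
-- stated objective: alternative
-- what changed: Instead of scanning the tags and growing a seen-list, B inverts the traversal: it iterates over the 14 fixed preferred tags, finds each one's first-occurrence index in the lowercased tag list, sorts the hits by that index and returns the first four.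
import Mathlib
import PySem

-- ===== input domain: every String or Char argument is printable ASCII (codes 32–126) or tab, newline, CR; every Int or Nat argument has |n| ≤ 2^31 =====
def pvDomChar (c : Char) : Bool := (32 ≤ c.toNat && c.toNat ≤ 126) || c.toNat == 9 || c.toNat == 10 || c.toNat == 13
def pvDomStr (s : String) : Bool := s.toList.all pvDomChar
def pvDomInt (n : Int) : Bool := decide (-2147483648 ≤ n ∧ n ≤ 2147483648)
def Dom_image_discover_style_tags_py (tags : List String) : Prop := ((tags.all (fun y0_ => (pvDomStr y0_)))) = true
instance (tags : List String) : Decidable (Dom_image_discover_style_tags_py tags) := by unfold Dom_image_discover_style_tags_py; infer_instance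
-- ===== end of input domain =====

-- B inverts the traversal: it scans the 14 preferred tags, locates each one's first occurrence in the lowercased input, sorts hits by index and takes four (alternative algorithm, same result).


-- the fixed set of preferred style tags (Python's `preferred` literal; 14 distinct strings)
def pvPreferred : List String :=
  ["photoreal", "illustration", "anime", "general", "fast", "detailed", "turbo",
   "distilled", "edit", "inpaint", "flux", "sana", "qwenimage", "hidream"]

-- ===== PORT A =====
-- A's loop body: lowered = str(tag).lower(); if lowered in preferred and lowered not in seen: seen.append(lowered)
def pvStepA (seen : List String) (tag : String) : List String :=
  let lowered := PySem.Str.lower tag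
  if pvPreferred.contains lowered && !seen.contains lowered then seen ++ [lowered] else seen

def image_discover_style_tags_py (tags : List String) : List String :=
  let seen := tags.foldl pvStepA []
  PySem.List.slice seen none (some 4)

-- ===== PORT B =====
-- lowered = [str(tag).lower() for tag in tags]; found = [(lowered.index(p), p) for p in preferred if p in lowered];
-- found.sort(key=pair[0]); return [p for _, p in found[:4]]
def image_discover_style_tags_py_alt (tags : List String) : List String :=
  let lowered := tags.map PySem.Str.lower
  let found := pvPreferred.filterMap (fun p =>
    if lowered.contains p then some ((((PySem.List.index? lowered p).getD 0 : Nat) : Int), p) else none)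
  let sortedFound := PySem.List.sorted found (fun pair => pair.1) false
  (PySem.List.slice sortedFound none (some 4)).map (fun pair => pair.2)

-- ===== PRECONDITION & SPEC =====
def Spec_image_discover_style_tags_py (tags : List String) (out : List String) : Prop := out = image_discover_style_tags_py_alt tags
instance (tags : List String) (out : List String) : Decidable (Spec_image_discover_style_tags_py tags out) := by unfold Spec_image_discover_style_tags_py; infer_instance

-- ===== CLAIM (what is proved, stated in full; the proofs are below) =====
def Claim_equal_image_discover_style_tags_py : Prop := ∀ (tags : List String), Dom_image_discover_style_tags_py tags → Spec_image_discover_style_tags_py tags (image_discover_style_tags_py tags)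

-- ===== LEMMAS AND PROOFS =====

-- structural first-occurrence dedup, used only to name A's loop result
def pvDed {α : Type} [BEq α] : List α → List α
  | [] => []
  | x :: xs => x :: (pvDed xs).filter (fun y => y != x)

-- A's interleaved loop is Set.add-folding over the filtered lowercased tags
theorem pv_loop_eq (ts : List String) (seen : List String) :
    ts.foldl pvStepA seen = List.foldl PySem.Set.add seen ((ts.map PySem.Str.lower).filter (fun x => pvPreferred.contains x)) := by
  induction ts generalizing seen with
  | nil => rfl
  | cons t ts ih =>
    simp only [List.foldl_cons, List.map_cons, List.filter_cons]
    by_cases h : pvPreferred.contains (PySem.Str.lower t)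
    · have h' : PySem.Str.lower t ∈ pvPreferred := by simpa using h
      rw [show pvStepA seen t = PySem.Set.add seen (PySem.Str.lower t) from by
        by_cases hc : PySem.Str.lower t ∈ seen <;> simp [pvStepA, PySem.Set.add, h', hc]]
      simp only [h, if_true, List.foldl_cons]
      exact ih _
    · have h' : PySem.Str.lower t ∉ pvPreferred := by simpa using h
      rw [show pvStepA seen t = seen from by simp [pvStepA, h']]
      simp only [h, Bool.false_eq_true, if_false]
      exact ih seen

-- the Set.add fold is the structural dedup of the not-yet-seen elements
theorem pv_fold_add_eq {α : Type} [BEq α] [LawfulBEq α] (L : List α) (acc : List α) :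
    List.foldl PySem.Set.add acc L = acc ++ (pvDed L).filter (fun y => !acc.contains y) := by
  induction L generalizing acc with
  | nil => simp [pvDed]
  | cons x xs ih =>
    simp only [List.foldl_cons, pvDed, List.filter_cons]
    by_cases hx : x ∈ acc
    · have hcx : (!acc.contains x) = false := by simpa using hx
      rw [show PySem.Set.add acc x = acc from by simp [PySem.Set.add, hx], ih acc, hcx]
      simp only [Bool.false_eq_true, if_false, List.filter_filter]
      congr 1
      apply List.filter_congr
      intro y _
      by_cases hy : y ∈ acc
      · simp [hy]
      · have hne : y ≠ x := fun h => hy (h ▸ hx)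
        simp [hy, hne]
    · have hcx : (!acc.contains x) = true := by simpa using hx
      rw [show PySem.Set.add acc x = acc ++ [x] from by simp [PySem.Set.add, hx], ih (acc ++ [x]), hcx]
      simp only [if_true, List.append_assoc, List.singleton_append, List.filter_filter]
      congr 2
      apply List.filter_congr
      intro y _
      by_cases hy : y = x
      · simp [hy]
      · by_cases hya : y ∈ acc <;> simp [hya, hy, bne_iff_ne]

theorem pvDed_mem {α : Type} [BEq α] [LawfulBEq α] (L : List α) (y : α) :
    y ∈ pvDed L ↔ y ∈ L := by
  induction L with
  | nil => simp [pvDed]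
  | cons x xs ih =>
    simp only [pvDed, List.mem_cons, List.mem_filter, ih, bne_iff_ne]
    constructor
    · rintro (rfl | ⟨h, _⟩)
      · left; rfl
      · right; exact h
    · rintro (rfl | h)
      · left; rfl
      · by_cases hy : y = x
        · left; exact hy
        · right; exact ⟨h, hy⟩

theorem pvDed_nodup {α : Type} [BEq α] [LawfulBEq α] (L : List α) : (pvDed L).Nodup := by
  induction L with
  | nil => simp [pvDed]
  | cons x xs ih =>
    simp only [pvDed, List.nodup_cons]
    constructor
    · intro h
      have := (List.mem_filter.mp h).2
      simp at this
    · exact ih.filter _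

theorem pvDed_filter {α : Type} [BEq α] [LawfulBEq α] (p : α → Bool) (L : List α) :
    pvDed (L.filter p) = (pvDed L).filter p := by
  induction L with
  | nil => simp [pvDed]
  | cons x xs ih =>
    by_cases hx : p x
    · simp only [List.filter_cons, hx, if_true, pvDed, ih, List.filter_filter]
      congr 1
      apply List.filter_congr
      intro y _
      exact Bool.and_comm _ _
    · simp only [List.filter_cons, hx, Bool.false_eq_true, if_false, pvDed, ih, List.filter_filter]
      apply List.filter_congr
      intro y _
      by_cases hy : y = x
      · subst hy; simp [hx]
      · have hb : (y != x) = true := by simp [bne_iff_ne, hy]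
        simp [hb]

theorem pvDed_pairwise_idxOf {α : Type} [BEq α] [LawfulBEq α] (L : List α) :
    (pvDed L).Pairwise (fun a b => L.idxOf a < L.idxOf b) := by
  induction L with
  | nil => simp [pvDed]
  | cons x xs ih =>
    simp only [pvDed, List.pairwise_cons]
    constructor
    · intro b hb
      have hbne : b ≠ x := by
        have := (List.mem_filter.mp hb).2; simpa [bne_iff_ne] using this
      rw [List.idxOf_cons_self, List.idxOf_cons_ne _ (Ne.symm hbne)]
      omega
    · have h1 : ((pvDed xs).filter (fun y => y != x)).Pairwise (fun a b => xs.idxOf a < xs.idxOf b) :=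
        ih.sublist List.filter_sublist
      refine List.Pairwise.imp_of_mem ?_ h1
      intro a b ha hb hab
      have hane : a ≠ x := by have := (List.mem_filter.mp ha).2; simpa [bne_iff_ne] using this
      have hbne : b ≠ x := by have := (List.mem_filter.mp hb).2; simpa [bne_iff_ne] using this
      rw [List.idxOf_cons_ne _ (Ne.symm hane), List.idxOf_cons_ne _ (Ne.symm hbne)]
      omega

-- B's comprehension is a map over the present preferred tags, carrying first-occurrence indices
theorem pv_found_eq (L : List String) (ps : List String) :
    ps.filterMap (fun p => if L.contains p then some ((((PySem.List.index? L p).getD 0 : Nat) : Int), p) else none)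
      = (ps.filter (fun p => L.contains p)).map (fun p => (((L.idxOf p : Nat) : Int), p)) := by
  induction ps with
  | nil => rfl
  | cons q qs ih =>
    simp only [List.filterMap_cons, List.filter_cons]
    by_cases hq : L.contains q
    · simp only [hq, if_true, List.map_cons, ih]
      congr 2
      rw [PySem.List.index?_eq_idxOf?]
      have hmem : q ∈ L := by simpa using hq
      have h1 := PySem.List.index?_isSome_iff (xs := L) (v := q)
      rw [PySem.List.index?_eq_idxOf?] at h1
      obtain ⟨k, hk⟩ := Option.isSome_iff_exists.mp (h1.mpr hmem)
      rw [hk]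
      rw [List.idxOf_eq_getD_idxOf?, hk]
      rfl
    · simp only [hq, Bool.false_eq_true, if_false, ih]

-- ===== VERDICT (by name: the statement is the Claim_ definition above) =====
theorem image_discover_style_tags_py_spec : Claim_equal_image_discover_style_tags_py := by
  intro tags _
  unfold Spec_image_discover_style_tags_py image_discover_style_tags_py image_discover_style_tags_py_alt
  rw [pv_loop_eq, pv_fold_add_eq]
  dsimp only
  rw [pv_found_eq]
  set L := tags.map PySem.Str.lower with hL
  set D := pvDed (L.filter (fun x => pvPreferred.contains x)) with hD
  set f : String → Int × String := fun p => (((L.idxOf p : Nat) : Int), p) with hf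
  have hbase : D.Perm (pvPreferred.filter (fun p => L.contains p)) := by
    rw [List.perm_ext_iff_of_nodup (pvDed_nodup _)
      ((by decide : pvPreferred.Nodup).filter _)]
    intro y
    simp only [pvDed_mem, List.mem_filter]
    simp [and_comm]
  have hpw : (D.map f).Pairwise (fun a b => a.1 < b.1) := by
    rw [List.pairwise_map]
    have h1 : D.Pairwise (fun a b => L.idxOf a < L.idxOf b) := by
      rw [hD, pvDed_filter]
      exact (pvDed_pairwise_idxOf L).sublist List.filter_sublist
    exact h1.imp (fun h => by simp only [hf]; exact_mod_cast h)
  have hsorted :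
      PySem.List.sorted ((pvPreferred.filter (fun p => L.contains p)).map f) (fun pair => pair.1) false
        = D.map f :=
    PySem.List.sorted_eq_of_perm_of_pairwise_lt _ _ _ (hbase.map f) hpw
  rw [hsorted]
  rw [show (4 : Int) = ((4 : Nat) : Int) from rfl,
      PySem.List.slice_to_natCast, PySem.List.slice_to_natCast]
  simp only [hf, List.map_take, List.map_map, Function.comp_def, List.map_id']
  simp
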